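-- pv_equiv track=rewrite | github.com/ANKITSANJYAL/AutomatedBI | backend/app/agents/kpi_strategist.py | _create_kpi_hierarchy
-- ===== SOURCE A (Python) =====
-- from typing import Dict, Any, List
--
-- def _create_kpi_hierarchy(calculated_kpis: Dict[str, Any], domain: str) -> Dict[str, List[str]]:
--     """Create a hierarchical structure for KPIs"""
--     hierarchy = {
--         'primary': [],
--         'secondary': [],
--         'operational': []
--     }
--
--     for kpi_name, kpi_data in calculated_kpis.items():
--         priority = kpi_data.get('priority', 3)
--
--         if priority == 1:
--             hierarchy['primary'].append(kpi_name)
--         elif priority == 2: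
--             hierarchy['secondary'].append(kpi_name)
--         else:
--             hierarchy['operational'].append(kpi_name)
--
--     return hierarchy
-- ===== SOURCE B (Python) =====
-- def _create_kpi_hierarchy(calculated_kpis, domain):
--     """Create a hierarchical structure for KPIs: stable-sort items by level, then slice."""
--     def level(item):
--         p = item[1].get('priority', 3)
--         return 1 if p == 1 else 2 if p == 2 else 3
--
--     ordered = sorted(calculated_kpis.items(), key=level)
--     levels = [level(it) for it in ordered]
--     i = levels.count(1)
--     j = i + levels.count(2)
--     names = [k for k, _ in ordered]
--     return {'primary': names[:i], 'secondary': names[i:j], 'operational': names[j:]}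
-- ===== Notes on version B (the rewrite author's own statement) =====
-- stated objective: alternative
-- what changed: Replaces the dispatching loop with mutable buckets by a stable sort of the items on a computed level key (1/2/3) followed by slicing the sorted name list at the level counts; stability of Python's sort preserves insertion order within each bucket.
import Mathlib
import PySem

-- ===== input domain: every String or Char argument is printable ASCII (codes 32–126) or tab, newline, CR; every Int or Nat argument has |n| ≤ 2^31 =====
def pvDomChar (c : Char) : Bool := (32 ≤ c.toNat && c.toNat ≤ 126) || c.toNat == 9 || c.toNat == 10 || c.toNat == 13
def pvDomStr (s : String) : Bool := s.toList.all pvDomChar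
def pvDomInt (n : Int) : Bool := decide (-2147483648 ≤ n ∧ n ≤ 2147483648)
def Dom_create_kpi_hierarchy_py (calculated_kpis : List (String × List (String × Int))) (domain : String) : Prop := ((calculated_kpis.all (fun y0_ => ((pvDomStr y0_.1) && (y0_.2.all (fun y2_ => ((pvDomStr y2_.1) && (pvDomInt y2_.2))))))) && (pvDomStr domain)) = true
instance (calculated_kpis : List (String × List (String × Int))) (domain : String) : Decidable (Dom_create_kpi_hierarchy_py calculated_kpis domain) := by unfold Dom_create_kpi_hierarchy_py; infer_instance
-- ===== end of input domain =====

-- B replaces A's single dispatching loop with mutable buckets by a stable sort on a level key followed by slicing at the level counts (return-value equivalence; 'alternative' objective, not claimed faster).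
-- ===== PORT A =====
def create_kpi_hierarchy_py (calculated_kpis : List (String × List (String × Int))) (domain : String) : List (String × List String) :=
  let h := calculated_kpis.foldl
    (fun (st : List String × List String × List String) kv =>
      let priority := PySem.Dict.getD ⟨kv.2⟩ "priority" (3 : Int)
      if priority == 1 then (st.1 ++ [kv.1], st.2.1, st.2.2)
      else if priority == 2 then (st.1, st.2.1 ++ [kv.1], st.2.2)
      else (st.1, st.2.1, st.2.2 ++ [kv.1]))
    ([], [], [])
  [("primary", h.1), ("secondary", h.2.1), ("operational", h.2.2)]

-- ===== PORT B =====
-- B's helper 'level': 1 if priority==1 else 2 if priority==2 else 3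
def pvLevel (kv : String × List (String × Int)) : Int :=
  let p := PySem.Dict.getD ⟨kv.2⟩ "priority" (3 : Int)
  if p == 1 then 1 else if p == 2 then 2 else 3

def create_kpi_hierarchy_py_alt (calculated_kpis : List (String × List (String × Int))) (domain : String) : List (String × List String) :=
  let ordered := PySem.List.sorted calculated_kpis pvLevel
  let levels := ordered.map pvLevel
  let i : Int := (PySem.List.count levels 1 : Nat)
  let j : Int := i + (PySem.List.count levels 2 : Nat)
  let names := ordered.map Prod.fst
  [("primary", PySem.List.slice names none (some i)),
   ("secondary", PySem.List.slice names (some i) (some j)),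
   ("operational", PySem.List.slice names (some j) none)]

-- ===== PRECONDITION & SPEC =====
def Spec_create_kpi_hierarchy_py (calculated_kpis : List (String × List (String × Int))) (domain : String) (out : List (String × List String)) : Prop := out = create_kpi_hierarchy_py_alt calculated_kpis domain
instance (calculated_kpis : List (String × List (String × Int))) (domain : String) (out : List (String × List String)) : Decidable (Spec_create_kpi_hierarchy_py calculated_kpis domain out) := by unfold Spec_create_kpi_hierarchy_py; infer_instance

-- ===== CLAIM (what is proved, stated in full; the proofs are below) =====
def Claim_equal_create_kpi_hierarchy_py : Prop := ∀ (calculated_kpis : List (String × List (String × Int))) (domain : String), Dom_create_kpi_hierarchy_py calculated_kpis domain → Spec_create_kpi_hierarchy_py calculated_kpis domain (create_kpi_hierarchy_py calculated_kpis domain)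

-- ===== LEMMAS AND PROOFS =====

lemma pvLevel_cases (a : String × List (String × Int)) : pvLevel a = 1 ∨ pvLevel a = 2 ∨ pvLevel a = 3 := by
  by_cases h1 : PySem.Dict.getD ⟨a.2⟩ "priority" (3 : Int) = 1
  · exact Or.inl (by simp [pvLevel, h1])
  · by_cases h2 : PySem.Dict.getD ⟨a.2⟩ "priority" (3 : Int) = 2
    · exact Or.inr (Or.inl (by simp [pvLevel, h1, h2]))
    · exact Or.inr (Or.inr (by simp [pvLevel, h1, h2]))

-- A's fold characterised by the three pvLevel filters
lemma fold_buckets (l : List (String × List (String × Int))) (a b c : List String) :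
    l.foldl
      (fun (st : List String × List String × List String) kv =>
        let priority := PySem.Dict.getD ⟨kv.2⟩ "priority" (3 : Int)
        if priority == 1 then (st.1 ++ [kv.1], st.2.1, st.2.2)
        else if priority == 2 then (st.1, st.2.1 ++ [kv.1], st.2.2)
        else (st.1, st.2.1, st.2.2 ++ [kv.1]))
      (a, b, c)
    = (a ++ (l.filter (fun kv => pvLevel kv == 1)).map Prod.fst,
       b ++ (l.filter (fun kv => pvLevel kv == 2)).map Prod.fst,
       c ++ (l.filter (fun kv => pvLevel kv == 3)).map Prod.fst) := by
  induction l generalizing a b c with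
  | nil => simp
  | cons kv t ih =>
    simp only [List.foldl_cons, List.filter_cons]
    by_cases h1 : PySem.Dict.getD ⟨kv.2⟩ "priority" (3 : Int) = 1
    · rw [if_pos (by simp [h1]), ih]; simp [pvLevel, h1]
    · by_cases h2 : PySem.Dict.getD ⟨kv.2⟩ "priority" (3 : Int) = 2
      · rw [if_neg (by simp [h1]), if_pos (by simp [h2]), ih]; simp [pvLevel, h1, h2]
      · rw [if_neg (by simp [h1]), if_neg (by simp [h2]), ih]; simp [pvLevel, h1, h2]

lemma insertBy_append_of_not {α : Type} (before : α → α → Bool) (x : α) (l1 l2 : List α)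
    (h : ∀ y ∈ l1, before x y = false) :
    PySem.List.insertBy before x (l1 ++ l2) = l1 ++ PySem.List.insertBy before x l2 := by
  induction l1 with
  | nil => simp
  | cons y t ih =>
    have hy : before x y = false := h y (by simp)
    simp only [List.cons_append, PySem.List.insertBy, hy]
    simp [ih (fun z hz => h z (by simp [hz]))]

lemma insertBy_all_before {α : Type} (before : α → α → Bool) (x : α) (l : List α)
    (h : ∀ y ∈ l, before x y = true) :
    PySem.List.insertBy before x l = x :: l := by
  cases l with
  | nil => simp [PySem.List.insertBy]
  | cons y t => simp [PySem.List.insertBy, h y (by simp)]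

-- stable sort by a {1,2,3}-valued key is the three filters in order
lemma sorted_tri (xs : List (String × List (String × Int))) :
    PySem.List.sorted xs pvLevel =
      xs.filter (fun a => pvLevel a == 1) ++ xs.filter (fun a => pvLevel a == 2) ++ xs.filter (fun a => pvLevel a == 3) := by
  rw [PySem.List.sorted_eq_foldl_insertBy]
  induction xs using List.reverseRecOn with
  | nil => simp
  | append_singleton t x ih =>
    rw [List.foldl_append, List.foldl_cons, List.foldl_nil, ih]
    simp only [List.filter_append, List.filter_cons, List.filter_nil]
    have m1 : ∀ y ∈ t.filter (fun a => pvLevel a == 1), pvLevel y = 1 := by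
      intro y hy; simpa using (List.mem_filter.mp hy).2
    have m2 : ∀ y ∈ t.filter (fun a => pvLevel a == 2), pvLevel y = 2 := by
      intro y hy; simpa using (List.mem_filter.mp hy).2
    have m3 : ∀ y ∈ t.filter (fun a => pvLevel a == 3), pvLevel y = 3 := by
      intro y hy; simpa using (List.mem_filter.mp hy).2
    rcases pvLevel_cases x with h | h | h
    · rw [List.append_assoc,
        insertBy_append_of_not _ x _ _ (by intro y hy; simp [h, m1 y hy]),
        insertBy_all_before _ x _ (by
          intro y hy
          rcases List.mem_append.mp hy with hy | hy
          · simp [h, m2 y hy]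
          · simp [h, m3 y hy])]
      simp [h]
    · rw [← List.append_assoc, ← List.append_assoc,
        insertBy_append_of_not _ x _ _ (by
          intro y hy
          rcases List.mem_append.mp hy with hy | hy
          · simp [h, m1 y hy]
          · simp [h, m2 y hy]),
        insertBy_all_before _ x _ (by intro y hy; simp [h, m3 y hy])]
      simp [h]
    · rw [PySem.List.insertBy_of_forall_not_before _ x _ (by
        intro y hy
        rcases List.mem_append.mp hy with hy | hy
        · rcases List.mem_append.mp hy with hy | hy
          · simp [h, m1 y hy]
          · simp [h, m2 y hy]
        · simp [h, m3 y hy])]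
      simp [h]

lemma map_const_replicate {α : Type} (f : α → Int) (c : Int) (l : List α)
    (h : ∀ y ∈ l, f y = c) : l.map f = List.replicate l.length c := by
  induction l with
  | nil => simp
  | cons a t ih =>
    simp [h a (by simp), ih (fun y hy => h y (by simp [hy])), List.replicate_succ]

lemma take_len_append {α : Type} (l1 l2 : List α) : (l1 ++ l2).take l1.length = l1 := by simp

lemma drop_len_append {α : Type} (l1 l2 : List α) : (l1 ++ l2).drop l1.length = l2 := by simp

-- ===== VERDICT (by name: the statement is the Claim_ definition above) =====
theorem create_kpi_hierarchy_py_spec : Claim_equal_create_kpi_hierarchy_py := by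
  intro kpis domain _
  unfold Spec_create_kpi_hierarchy_py
  simp only [create_kpi_hierarchy_py, create_kpi_hierarchy_py_alt]
  rw [fold_buckets, sorted_tri]
  set F1 := kpis.filter (fun a => pvLevel a == 1) with hF1
  set F2 := kpis.filter (fun a => pvLevel a == 2) with hF2
  set F3 := kpis.filter (fun a => pvLevel a == 3) with hF3
  have e1 : ∀ y ∈ F1, pvLevel y = 1 := fun y hy => by simpa using (List.mem_filter.mp hy).2
  have e2 : ∀ y ∈ F2, pvLevel y = 2 := fun y hy => by simpa using (List.mem_filter.mp hy).2
  have e3 : ∀ y ∈ F3, pvLevel y = 3 := fun y hy => by simpa using (List.mem_filter.mp hy).2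
  have hmap : (F1 ++ F2 ++ F3).map pvLevel
      = List.replicate F1.length 1 ++ List.replicate F2.length 2 ++ List.replicate F3.length 3 := by
    simp [map_const_replicate _ _ _ e1, map_const_replicate _ _ _ e2, map_const_replicate _ _ _ e3]
  have hc1 : PySem.List.count ((F1 ++ F2 ++ F3).map pvLevel) 1 = F1.length := by
    unfold PySem.List.count
    rw [hmap]
    simp [List.count_append, List.count_replicate]
  have hc2 : PySem.List.count ((F1 ++ F2 ++ F3).map pvLevel) 2 = F2.length := by
    unfold PySem.List.count
    rw [hmap]
    simp [List.count_append, List.count_replicate]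
  rw [hc1, hc2]
  have hj : ((F1.length : Int) + (F2.length : Int)) = (((F1.length + F2.length : Nat)) : Int) := by
    push_cast; ring
  have hn1 : ((F1.length : Int)).toNat = (F1.map Prod.fst).length := by simp
  have hn12 : (((F1.length + F2.length : Nat) : Int)).toNat
      = ((F1.map Prod.fst) ++ (F2.map Prod.fst)).length := by
    simp only [List.length_append, List.length_map]
    omega
  have hs1 : PySem.List.slice ((F1 ++ F2 ++ F3).map Prod.fst) none (some ((F1.length : Nat) : Int))
      = F1.map Prod.fst := by
    rw [PySem.List.slice_to _ (by positivity), hn1]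
    have : (F1 ++ F2 ++ F3).map Prod.fst = (F1.map Prod.fst) ++ ((F2.map Prod.fst) ++ (F3.map Prod.fst)) := by simp
    rw [this, take_len_append]
  have hs2 : PySem.List.slice ((F1 ++ F2 ++ F3).map Prod.fst)
      (some ((F1.length : Nat) : Int)) (some ((F1.length : Int) + (F2.length : Int)))
      = F2.map Prod.fst := by
    rw [hj, PySem.List.slice_natCast]
    have : (F1 ++ F2 ++ F3).map Prod.fst = (F1.map Prod.fst) ++ ((F2.map Prod.fst) ++ (F3.map Prod.fst)) := by simp
    rw [this]
    rw [show F1.length = (F1.map Prod.fst).length by simp]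
    rw [drop_len_append]
    have hlen : (F1.map Prod.fst).length + F2.length - (F1.map Prod.fst).length = F2.length := by omega
    rw [hlen, show F2.length = (F2.map Prod.fst).length by simp, take_len_append]
  have hs3 : PySem.List.slice ((F1 ++ F2 ++ F3).map Prod.fst)
      (some ((F1.length : Int) + (F2.length : Int))) none
      = F3.map Prod.fst := by
    rw [hj, PySem.List.slice_from _ (by positivity), hn12]
    have : (F1 ++ F2 ++ F3).map Prod.fst = ((F1.map Prod.fst) ++ (F2.map Prod.fst)) ++ (F3.map Prod.fst) := by simp
    rw [this, drop_len_append]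
  rw [hs1, hs2, hs3]
  simp
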